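-- pv_equiv track=rewrite | github.com/amplify-education/asiaq | disco_aws_automation/disco_autoscale.py | _get_snapshot_dev
-- ===== SOURCE A (Python) =====
-- def _get_snapshot_dev(launch_config, hostclass):
--     """Returns the snapshot device config"""
--     snapshot_devs = [
--         device
--         for device in launch_config['BlockDeviceMappings']
--         if device.get('Ebs', {}).get('SnapshotId')
--     ]
--     if not snapshot_devs:
--         raise Exception("Hostclass {0} does not mount a snapshot".format(hostclass))
--     elif len(snapshot_devs) > 1:
--         raise Exception("Unsupported configuration: hostclass {0} has multiple snapshot based devices."
--                         .format(hostclass))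
--     return snapshot_devs[0]
-- ===== SOURCE B (Python) =====
-- def _get_snapshot_dev(launch_config, hostclass):
--     """Returns the snapshot device config"""
--     devices = launch_config['BlockDeviceMappings']
--     for i, device in enumerate(devices):
--         if device.get('Ebs', {}).get('SnapshotId'):
--             if any(d.get('Ebs', {}).get('SnapshotId') for d in devices[i + 1:]):
--                 raise Exception("Unsupported configuration: hostclass {0} has multiple snapshot based devices."
--                                 .format(hostclass))
--             return device
--     raise Exception("Hostclass {0} does not mount a snapshot".format(hostclass))
-- ===== Notes on version B (the rewrite author's own statement) =====
-- stated objective: alternative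
-- what changed: Instead of collecting all snapshot devices into a list and inspecting its length, B early-returns the FIRST snapshot device after verifying with any() that the remaining suffix contains no further one, and raises after the loop if no device matched.
import Mathlib
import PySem

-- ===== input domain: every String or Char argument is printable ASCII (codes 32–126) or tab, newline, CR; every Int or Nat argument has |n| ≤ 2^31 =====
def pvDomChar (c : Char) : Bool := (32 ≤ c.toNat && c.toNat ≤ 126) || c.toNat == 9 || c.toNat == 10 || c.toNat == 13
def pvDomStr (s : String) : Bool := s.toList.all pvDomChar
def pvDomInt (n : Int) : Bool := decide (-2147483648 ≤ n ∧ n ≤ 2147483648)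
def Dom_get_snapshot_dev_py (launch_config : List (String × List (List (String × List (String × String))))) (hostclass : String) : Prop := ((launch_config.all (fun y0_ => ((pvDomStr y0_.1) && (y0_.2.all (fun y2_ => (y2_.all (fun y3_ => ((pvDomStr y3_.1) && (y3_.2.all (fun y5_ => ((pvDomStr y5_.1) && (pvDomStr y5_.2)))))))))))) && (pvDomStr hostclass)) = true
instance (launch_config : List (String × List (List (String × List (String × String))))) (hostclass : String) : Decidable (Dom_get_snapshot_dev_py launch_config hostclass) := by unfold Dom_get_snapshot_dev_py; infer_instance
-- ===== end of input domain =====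

-- B replaces A's collect-then-count structure by an early-returning scan that takes the
-- FIRST snapshot device and verifies the remaining suffix has no further one (objective: alternative).

-- first-match association-list lookup = Python dict .get / [] under the type convention
def pvLookup {α : Type} (d : List (String × α)) (k : String) : Option α :=
  (d.find? (fun p => p.1 == k)).map (·.2)

-- device.get('Ebs', {}).get('SnapshotId') is truthy (non-None, non-empty string)
def pvHasSnap (device : List (String × List (String × String))) : Bool :=
  match pvLookup ((pvLookup device "Ebs").getD []) "SnapshotId" with
  | some s => !(s == "")
  | none => false

-- ===== PORT A =====
-- A raises on inputs outside Pre_; there the port returns a dummy [] via getD.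
def get_snapshot_dev_py (launch_config : List (String × List (List (String × List (String × String))))) (hostclass : String) : List (String × List (String × String)) :=
  let devs := (pvLookup launch_config "BlockDeviceMappings").getD []
  let snapshot_devs := devs.filter (fun device => pvHasSnap device)
  (PySem.List.pyGet? snapshot_devs 0).getD []

-- ===== PORT B =====
-- Source B's loop: return the first matching device unless any() finds a later match;
-- the two 'raise' sites of Source B lie outside Pre_ and yield the dummy [] here.
def pvFindFirst (devs : List (List (String × List (String × String)))) : List (String × List (String × String)) :=
  match devs with
  | [] => []            -- Source B raises 'does not mount a snapshot' here
  | device :: rest =>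
    if pvHasSnap device then
      if rest.any (fun d => pvHasSnap d) then []   -- Source B raises 'multiple snapshot based devices' here
      else device
    else pvFindFirst rest

def get_snapshot_dev_py_alt (launch_config : List (String × List (List (String × List (String × String))))) (hostclass : String) : List (String × List (String × String)) :=
  pvFindFirst ((pvLookup launch_config "BlockDeviceMappings").getD [])

-- ===== PRECONDITION & SPEC =====
-- Pre_: the key 'BlockDeviceMappings' is present (else KeyError) and exactly one
-- device has a truthy Ebs.SnapshotId (A raises on zero or on more than one).
def Pre_get_snapshot_dev_py (launch_config : List (String × List (List (String × List (String × String))))) (hostclass : String) : Prop :=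
  (match pvLookup launch_config "BlockDeviceMappings" with
   | none => false
   | some devs => (devs.filter (fun device => pvHasSnap device)).length == 1) = true

instance (launch_config : List (String × List (List (String × List (String × String))))) (hostclass : String) : Decidable (Pre_get_snapshot_dev_py launch_config hostclass) := by unfold Pre_get_snapshot_dev_py; infer_instance

def pvWitness_get_snapshot_dev_py : (List (String × List (List (String × List (String × String))))) × String :=
  ([("BlockDeviceMappings", [[("Ebs", [("SnapshotId", "snap-1")])], []])], "web")

def Spec_get_snapshot_dev_py (launch_config : List (String × List (List (String × List (String × String))))) (hostclass : String) (out : List (String × List (String × String))) : Prop := out = get_snapshot_dev_py_alt launch_config hostclass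
instance (launch_config : List (String × List (List (String × List (String × String))))) (hostclass : String) (out : List (String × List (String × String))) : Decidable (Spec_get_snapshot_dev_py launch_config hostclass out) := by unfold Spec_get_snapshot_dev_py; infer_instance

-- ===== CLAIM (what is proved, stated in full; the proofs are below) =====
def Claim_equal_get_snapshot_dev_py : Prop := ∀ (launch_config : List (String × List (List (String × List (String × String))))) (hostclass : String), Dom_get_snapshot_dev_py launch_config hostclass → Pre_get_snapshot_dev_py launch_config hostclass → Spec_get_snapshot_dev_py launch_config hostclass (get_snapshot_dev_py launch_config hostclass)

-- ===== LEMMAS AND PROOFS =====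

-- under 'exactly one match', B's early-return scan yields the head of A's filter
theorem pvFindFirst_of_one (devs : List (List (String × List (String × String))))
    (h : (devs.filter (fun device => pvHasSnap device)).length = 1) :
    some (pvFindFirst devs) = (devs.filter (fun device => pvHasSnap device)).head? := by
  induction devs with
  | nil => simp at h
  | cons x rest ih =>
    by_cases hx : pvHasSnap x
    · have hrest : rest.filter (fun device => pvHasSnap device) = [] := by
        have h' := h
        rw [List.filter_cons_of_pos hx] at h'
        simpa using h'
      have hany : rest.any (fun d => pvHasSnap d) = false := by
        rw [Bool.eq_false_iff]
        intro hc
        obtain ⟨d, hd, hds⟩ := List.any_eq_true.mp hc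
        have : d ∈ rest.filter (fun device => pvHasSnap device) := List.mem_filter.mpr ⟨hd, hds⟩
        simp [hrest] at this
      simp [pvFindFirst, hx, hany, List.filter_cons_of_pos hx]
    · rw [List.filter_cons_of_neg hx] at h
      simpa [pvFindFirst, hx, List.filter_cons_of_neg hx] using ih h

-- ===== VERDICT (by name: the statement is the Claim_ definition above) =====
theorem get_snapshot_dev_py_spec : Claim_equal_get_snapshot_dev_py := by
  intro lc hc _ hpre
  unfold Pre_get_snapshot_dev_py at hpre
  unfold Spec_get_snapshot_dev_py get_snapshot_dev_py get_snapshot_dev_py_alt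
  cases hlk : pvLookup lc "BlockDeviceMappings" with
  | none => rw [hlk] at hpre; exact absurd hpre (by simp)
  | some devs =>
    rw [hlk] at hpre
    simp only [Option.getD_some]
    have h1 : (devs.filter (fun device => pvHasSnap device)).length = 1 := by simpa using hpre
    have := pvFindFirst_of_one devs h1
    obtain ⟨d, hd⟩ := List.length_eq_one_iff.mp h1
    rw [hd] at this ⊢
    simp [PySem.List.pyGet?, PySem.List.pyIdx?]
    simpa using this.symm
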